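-- pv_equiv track=rewrite | github.com/inderpal2406/python-practice-2022 | PYnative/01-loop-exercises/ex16c_sum_of_series_upto_n_terms.py | SumOfSeriesOfNTermsOfNum
-- ===== SOURCE A (Python) =====
-- def SumOfSeriesOfNTermsOfNum(fn_num,fn_num_n):
--     """Function to calculate sum of series of n terms of num"""
--     fn_sum = 0
--     for eachnumi in range(1,fn_num_n+1,1):
--         count = 1
--         numlist = []
--         while count <= eachnumi:
--             numlist.append(fn_num)
--             count = count + 1
--         listlength = len(numlist)
--         num = 0
--         index = 0
--         for eachnumj in numlist:
--             # As all list items are same, it takes the same index value of the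
--             # first found match everytime in subsequent iteration. So, below
--             # statement is commented & another logic of index is implemented.
--             #index = numlist.index(eachnumj)
--             multipliercount = listlength - index - 1
--             tensproduct = 10 ** multipliercount
--             product = eachnumj * tensproduct
--             num = num + product
--             index = index + 1
--         fn_sum = fn_sum + num
--     return fn_sum
-- ===== SOURCE B (Python) =====
-- def SumOfSeriesOfNTermsOfNum(fn_num, fn_num_n):
--     """Function to calculate sum of series of n terms of num"""
--     fn_sum = 0
--     rep = 0
--     for _ in range(fn_num_n):
--         rep = rep * 10 + 1
--         fn_sum = fn_sum + fn_num * rep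
--     return fn_sum
-- ===== Notes on version B (the rewrite author's own statement) =====
-- stated objective: faster
-- what changed: Replaces the per-term construction of a repeated-digit list and a positional inner loop with a single pass that maintains the repunit r=r*10+1 and adds fn_num*r each step.
import Mathlib
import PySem

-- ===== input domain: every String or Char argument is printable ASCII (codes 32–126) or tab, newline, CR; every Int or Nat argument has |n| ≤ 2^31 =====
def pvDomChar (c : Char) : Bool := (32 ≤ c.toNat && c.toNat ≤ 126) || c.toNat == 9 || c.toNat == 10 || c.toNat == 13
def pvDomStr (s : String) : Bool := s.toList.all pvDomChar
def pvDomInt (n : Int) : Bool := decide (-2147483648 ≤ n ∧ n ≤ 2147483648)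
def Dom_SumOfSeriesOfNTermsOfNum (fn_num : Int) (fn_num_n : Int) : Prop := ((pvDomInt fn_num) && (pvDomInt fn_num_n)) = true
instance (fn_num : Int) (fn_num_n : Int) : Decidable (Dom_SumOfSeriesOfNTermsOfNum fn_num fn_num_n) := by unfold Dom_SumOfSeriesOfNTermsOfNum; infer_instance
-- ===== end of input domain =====

-- B replaces A's per-term list building and positional inner loop by a single pass
-- maintaining the repunit (objective: faster, O(n) loop steps instead of O(n^2)).

-- ===== PORT A =====
-- the while loop 'while count <= eachnumi: numlist.append(fn_num); count += 1'
def pvBuild (fn_num : Int) (count : Int) (eachnumi : Int) : List Int :=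
  if count ≤ eachnumi then fn_num :: pvBuild fn_num (count + 1) eachnumi else []
termination_by (eachnumi + 1 - count).toNat
decreasing_by omega

def SumOfSeriesOfNTermsOfNum (fn_num : Int) (fn_num_n : Int) : Int :=
  (PySem.List.pyRange 1 (fn_num_n + 1) 1).foldl (fun fn_sum eachnumi =>
    let numlist := pvBuild fn_num 1 eachnumi
    let listlength : Int := numlist.length
    -- inner 'for eachnumj in numlist' carrying (num, index); the exponent
    -- listlength - index - 1 is always ≥ 0 in the loop, so '.toNat' is exact here
    let r := numlist.foldl (fun (st : Int × Int) eachnumj =>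
      let multipliercount := listlength - st.2 - 1
      let tensproduct : Int := 10 ^ multipliercount.toNat
      let product := eachnumj * tensproduct
      (st.1 + product, st.2 + 1)) (0, 0)
    fn_sum + r.1) 0

-- ===== PORT B =====
def SumOfSeriesOfNTermsOfNum_alt (fn_num : Int) (fn_num_n : Int) : Int :=
  ((PySem.List.pyRange 0 fn_num_n 1).foldl (fun (st : Int × Int) _ =>
    let rep := st.1 * 10 + 1
    (rep, st.2 + fn_num * rep)) (0, 0)).2

-- ===== PRECONDITION & SPEC =====
def Spec_SumOfSeriesOfNTermsOfNum (fn_num : Int) (fn_num_n : Int) (out : Int) : Prop := out = SumOfSeriesOfNTermsOfNum_alt fn_num fn_num_n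
instance (fn_num : Int) (fn_num_n : Int) (out : Int) : Decidable (Spec_SumOfSeriesOfNTermsOfNum fn_num fn_num_n out) := by unfold Spec_SumOfSeriesOfNTermsOfNum; infer_instance

-- ===== CLAIM (what is proved, stated in full; the proofs are below) =====
def Claim_equal_SumOfSeriesOfNTermsOfNum : Prop := ∀ (fn_num : Int) (fn_num_n : Int), Dom_SumOfSeriesOfNTermsOfNum fn_num fn_num_n → Spec_SumOfSeriesOfNTermsOfNum fn_num fn_num_n (SumOfSeriesOfNTermsOfNum fn_num fn_num_n)

-- ===== LEMMAS AND PROOFS =====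

-- repunit m = 11…1 with m ones
def pvRepunit : Nat → Int
  | 0 => 0
  | m + 1 => pvRepunit m * 10 + 1

theorem pvBuild_eq_replicate (fn_num : Int) (count eachnumi : Int) :
    pvBuild fn_num count eachnumi = List.replicate (eachnumi + 1 - count).toNat fn_num := by
  fun_induction pvBuild with
  | case1 count h ih =>
      have he : (eachnumi + 1 - count).toNat = (eachnumi + 1 - (count + 1)).toNat + 1 := by omega
      rw [he, List.replicate_succ, ih]
  | case2 count h =>
      have he : (eachnumi + 1 - count).toNat = 0 := by omega
      simp [he]

theorem pvRepunit_succ_left (m : Nat) : pvRepunit (m + 1) = 10 ^ m + pvRepunit m := by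
  induction m with
  | zero => simp [pvRepunit]
  | succ k ih =>
      calc pvRepunit (k + 2) = pvRepunit (k + 1) * 10 + 1 := rfl
        _ = (10 ^ k + pvRepunit k) * 10 + 1 := by rw [ih]
        _ = 10 ^ (k + 1) + (pvRepunit k * 10 + 1) := by ring
        _ = 10 ^ (k + 1) + pvRepunit (k + 1) := rfl

-- the inner positional fold over a constant list sums fn_num * repunit
theorem inner_fold (fn_num : Int) (L : Int) (m : Nat) (i num : Int) (h : i + m = L) :
    (List.replicate m fn_num).foldl (fun (st : Int × Int) eachnumj =>
      (st.1 + eachnumj * 10 ^ (L - st.2 - 1).toNat, st.2 + 1)) (num, i)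
    = (num + fn_num * pvRepunit m, i + m) := by
  induction m generalizing i num with
  | zero => simp [pvRepunit]
  | succ k ih =>
      rw [List.replicate_succ, List.foldl_cons, ih (i + 1) _ (by omega)]
      have hexp : (L - i - 1).toNat = k := by omega
      rw [hexp, pvRepunit_succ_left]
      simp only [Prod.mk.injEq]
      refine ⟨by ring, by omega⟩

theorem a_term (fn_num : Int) (eachnumi : Int) (h : 0 ≤ eachnumi) :
    (let numlist := pvBuild fn_num 1 eachnumi
     let listlength : Int := numlist.length
     (numlist.foldl (fun (st : Int × Int) eachnumj =>
       (st.1 + eachnumj * 10 ^ (listlength - st.2 - 1).toNat, st.2 + 1)) (0, 0)).1)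
    = fn_num * pvRepunit eachnumi.toNat := by
  simp only [pvBuild_eq_replicate, List.length_replicate]
  have hl : (eachnumi + 1 - 1).toNat = eachnumi.toNat := by omega
  rw [hl, inner_fold fn_num eachnumi.toNat eachnumi.toNat 0 0 (by omega)]
  simp

-- A over the first n terms
theorem a_range (fn_num : Int) (n : Nat) (s : Int) :
    (PySem.List.pyRange 1 ((n : Int) + 1) 1).foldl (fun fn_sum eachnumi =>
      let numlist := pvBuild fn_num 1 eachnumi
      let listlength : Int := numlist.length
      let r := numlist.foldl (fun (st : Int × Int) eachnumj =>
        let multipliercount := listlength - st.2 - 1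
        let tensproduct : Int := 10 ^ multipliercount.toNat
        let product := eachnumj * tensproduct
        (st.1 + product, st.2 + 1)) (0, 0)
      fn_sum + r.1) s
    = s + ((List.range n).map (fun k => fn_num * pvRepunit (k + 1))).sum := by
  induction n generalizing s with
  | zero => simp [PySem.List.pyRange_one_eq_nil]
  | succ k ih =>
      rw [show ((k + 1 : Nat) : Int) + 1 = ((k : Int) + 1) + 1 by push_cast; ring,
          PySem.List.pyRange_one_succ_right (by omega), List.foldl_append, ih,
          List.range_succ, List.map_append, List.sum_append]
      simp only [List.foldl_cons, List.foldl_nil, List.map_cons, List.map_nil,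
        List.sum_cons, List.sum_nil]
      have ht := a_term fn_num ((k : Int) + 1) (by omega)
      simp only at ht
      rw [ht]
      have hn : ((k : Int) + 1).toNat = k + 1 := by omega
      rw [hn]
      ring

-- B over the first n steps: state is (repunit, partial sum)
theorem b_range (fn_num : Int) (n : Nat) (m : Nat) (s : Int) :
    (PySem.List.pyRange 0 (n : Int) 1).foldl (fun (st : Int × Int) _ =>
      let rep := st.1 * 10 + 1
      (rep, st.2 + fn_num * rep)) (pvRepunit m, s)
    = (pvRepunit (m + n),
       s + ((List.range n).map (fun k => fn_num * pvRepunit (m + k + 1))).sum) := by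
  induction n generalizing m s with
  | zero => simp [PySem.List.pyRange_one_eq_nil]
  | succ k ih =>
      rw [show ((k + 1 : Nat) : Int) = (k : Int) + 1 by push_cast; ring,
          PySem.List.pyRange_one_succ_right (by omega), List.foldl_append, ih,
          List.range_succ, List.map_append, List.sum_append]
      simp only [List.foldl_cons, List.foldl_nil, List.map_cons, List.map_nil,
        List.sum_cons, List.sum_nil]
      have h1 : pvRepunit (m + k) * 10 + 1 = pvRepunit (m + k + 1) := rfl
      rw [h1]
      simp only [Prod.mk.injEq]
      refine ⟨by rw [show m + (k + 1) = m + k + 1 from by omega], by ring⟩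

theorem main_eq (fn_num fn_num_n : Int) :
    SumOfSeriesOfNTermsOfNum fn_num fn_num_n = SumOfSeriesOfNTermsOfNum_alt fn_num fn_num_n := by
  unfold SumOfSeriesOfNTermsOfNum SumOfSeriesOfNTermsOfNum_alt
  rcases le_or_gt fn_num_n 0 with h | h
  · rw [PySem.List.pyRange_one_eq_nil (by omega), PySem.List.pyRange_one_eq_nil (by omega)]
    simp
  · obtain ⟨n, rfl⟩ : ∃ n : Nat, fn_num_n = (n : Int) := ⟨fn_num_n.toNat, by omega⟩
    rw [a_range fn_num n 0]
    have hb := b_range fn_num n 0 0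
    rw [show pvRepunit 0 = 0 from rfl] at hb
    rw [hb]
    simp

-- ===== VERDICT (by name: the statement is the Claim_ definition above) =====
theorem SumOfSeriesOfNTermsOfNum_spec : Claim_equal_SumOfSeriesOfNTermsOfNum := by
  intro fn_num fn_num_n _
  unfold Spec_SumOfSeriesOfNTermsOfNum
  exact main_eq fn_num fn_num_n
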